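-- pv_equiv track=rewrite | github.com/qige96/7CCSMDLC | exam-review/DMcode.py | three_item_sets
-- ===== SOURCE A (Python) =====
-- def three_item_sets(two_sets, txs):
--     '''
--     construct three-item set from one-item set
--
--     Parameters
--     ----------
--     two_sets: list
--         two-item sets
--     txs: list
--         list of transactions that is a list of items
--
--     Returns
--     -------
--     three_sets: list
--         list of three-item sets
--
--     Examples
--     --------
--         from Lecure 6 Slide 13
--         >>> txs = [['o','s'], ['m','o','w'], ['o','d'], ['o','d','s'], ['w','s']]
--         >>> two_sets = [('o','s'), ('o','d')]
--         >>> three_item_sets(two_sets, txs)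
--         [('o', 's', 'd')]
--     '''
--     three_sets = []
--     items = []
--     for i in two_sets:
--         for k in i:
--             if k not in items:
--                 items.append(k)
--
--     from itertools import combinations_with_replacement
--     for tup in combinations_with_replacement(items, 3):
--         if len(set(tup)) == 3:
--             for tx in txs:
--                 if (tup[0] in tx) and (tup[1] in tx) and (tup[2] in tx):
--                     three_sets.append(tup)
--     return three_sets
-- ===== SOURCE B (Python) =====
-- def three_item_sets(two_sets, txs):
--     # Transaction-centric algorithm: instead of enumerating every triple of
--     # items and scanning the transactions for each, walk the transactions ONCE,
--     # generate only the triples each transaction actually contains (as index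
--     # triples), tally them in a dict, then emit the tally in sorted index order
--     # (= the triple enumeration order of A).
--     pos = {}
--     items = []
--     for pair in two_sets:
--         for k in pair:
--             if k not in pos:
--                 pos[k] = len(items)
--                 items.append(k)
--     from itertools import combinations
--     counts = {}
--     for tx in txs:
--         idxs = sorted({pos[k] for k in tx if k in pos})
--         for trip in combinations(idxs, 3):
--             counts[trip] = counts.get(trip, 0) + 1
--     out = []
--     for trip in sorted(counts):
--         out += [(items[trip[0]], items[trip[1]], items[trip[2]])] * counts[trip]
--     return out
-- ===== Notes on version B (the rewrite author's own statement) =====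
-- stated objective: faster
-- what changed: B is transaction-centric instead of triple-centric: rather than enumerating every distinct item triple and scanning all transactions for each, it builds an item->index map once, walks the transactions a single time tallying only the index triples actually contained in each transaction into a dict, and then emits the tally in sorted index order (which equals A's triple enumeration order); the m^3-sized outer enumeration and the per-triple transaction scans disappear.
import Mathlib
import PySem

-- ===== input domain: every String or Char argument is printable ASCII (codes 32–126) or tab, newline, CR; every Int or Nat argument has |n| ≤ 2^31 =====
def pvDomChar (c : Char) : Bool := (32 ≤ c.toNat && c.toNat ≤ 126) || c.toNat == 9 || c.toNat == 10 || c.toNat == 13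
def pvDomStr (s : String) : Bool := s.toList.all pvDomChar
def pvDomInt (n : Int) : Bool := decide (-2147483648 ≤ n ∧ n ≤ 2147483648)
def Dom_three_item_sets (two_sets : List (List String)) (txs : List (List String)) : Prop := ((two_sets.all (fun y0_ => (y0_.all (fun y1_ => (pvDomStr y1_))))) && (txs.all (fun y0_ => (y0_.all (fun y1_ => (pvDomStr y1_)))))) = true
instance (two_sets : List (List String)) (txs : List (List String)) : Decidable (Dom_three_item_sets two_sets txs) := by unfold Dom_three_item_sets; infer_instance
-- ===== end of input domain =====

-- B inverts the loop structure: instead of enumerating every item triple and scanning all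
-- transactions for each, it walks the transactions once, tallies only the index triples each
-- transaction actually contains, and emits the tally in sorted index order.

-- ===== PORT A =====
-- items accumulation: 'for i in two_sets: for k in i: if k not in items: items.append(k)'
def pvItemsA (two_sets : List (List String)) : List String :=
  two_sets.foldl (fun items i =>
    i.foldl (fun items k => if k ∈ items then items else items ++ [k]) items) []

-- itertools.combinations_with_replacement(items, 2) / (items, 3), exact
-- (lexicographic by index, i ≤ j ≤ k); a tuple is represented as a length-2/3 list
def pvCW2 (l : List String) : List (List String) :=
  match l with
  | [] => []
  | x :: xs => (x :: xs).map (fun c => [x, c]) ++ pvCW2 xs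

def pvCW3 (l : List String) : List (List String) :=
  match l with
  | [] => []
  | x :: xs => (pvCW2 (x :: xs)).map (fun p => x :: p) ++ pvCW3 xs

def three_item_sets (two_sets : List (List String)) (txs : List (List String)) : List (List String) :=
  (pvCW3 (pvItemsA two_sets)).foldl (fun acc t =>
    if (PySem.Set.ofList t).length == 3 then
      txs.foldl (fun acc tx =>
        if PySem.List.pyGetD t 0 "" ∈ tx ∧ PySem.List.pyGetD t 1 "" ∈ tx ∧ PySem.List.pyGetD t 2 "" ∈ tx
        then acc ++ [t] else acc) acc
    else acc) []

-- ===== PORT B =====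
-- 'if k not in pos: pos[k] = len(items); items.append(k)'
def pvBuildB (two_sets : List (List String)) : PySem.Dict String Nat × List String :=
  two_sets.foldl (fun st pair =>
    pair.foldl (fun st k =>
      if st.1.contains k then st
      else (st.1.insert k st.2.length, st.2 ++ [k])) st) (PySem.Dict.empty, [])

-- itertools.combinations(l, 2) / (l, 3), exact (lexicographic by index, i < j < k);
-- tuples represented as length-2/3 lists (Python tuple comparison = List lex order)
def pvC2 {α : Type} (l : List α) : List (List α) :=
  match l with
  | [] => []
  | x :: xs => xs.map (fun c => [x, c]) ++ pvC2 xs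

def pvC3 {α : Type} (l : List α) : List (List α) :=
  match l with
  | [] => []
  | x :: xs => (pvC2 xs).map (fun p => x :: p) ++ pvC3 xs

-- tally loop: 'for tx in txs: for trip in combinations(sorted({pos[k] …}), 3): counts[trip] += 1'
def pvCountsB (pos : PySem.Dict String Nat) (txs : List (List String)) : PySem.Dict (List Nat) Int :=
  txs.foldl (fun d tx =>
      (pvC3 (PySem.List.sorted (PySem.Set.ofList (tx.filterMap (fun k => pos.get? k))) (fun x => x) false)).foldl
        (fun d trip => d.insert trip (d.getD trip 0 + 1)) d)
    PySem.Dict.empty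

-- output loop: 'for trip in sorted(counts): out += [(items[trip[0]], …)] * counts[trip]'
def pvEmitB (items : List String) (counts : PySem.Dict (List Nat) Int) : List (List String) :=
  (PySem.List.sorted counts.keys (fun x => x) false).foldl (fun acc trip =>
    acc ++ List.replicate (counts.getD trip 0).toNat
      [PySem.List.pyGetD items ((PySem.List.pyGetD trip 0 0 : Nat) : Int) "",
       PySem.List.pyGetD items ((PySem.List.pyGetD trip 1 0 : Nat) : Int) "",
       PySem.List.pyGetD items ((PySem.List.pyGetD trip 2 0 : Nat) : Int) ""]) []

def three_item_sets_alt (two_sets : List (List String)) (txs : List (List String)) : List (List String) :=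
  pvEmitB (pvBuildB two_sets).2 (pvCountsB (pvBuildB two_sets).1 txs)

-- ===== PRECONDITION & SPEC =====
def Spec_three_item_sets (two_sets : List (List String)) (txs : List (List String)) (out : List (List String)) : Prop := out = three_item_sets_alt two_sets txs
instance (two_sets : List (List String)) (txs : List (List String)) (out : List (List String)) : Decidable (Spec_three_item_sets two_sets txs out) := by unfold Spec_three_item_sets; infer_instance

-- ===== CLAIM (what is proved, stated in full; the proofs are below) =====
def Claim_equal_three_item_sets : Prop := ∀ (two_sets : List (List String)) (txs : List (List String)), Dom_three_item_sets two_sets txs → Spec_three_item_sets two_sets txs (three_item_sets two_sets txs)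

-- ===== LEMMAS AND PROOFS =====

-- proof-only abbreviations: the canonical index list of a transaction, and the
-- number of transactions containing all items named by an index triple
def pvIdxs (items : List String) (tx : List String) : List Nat :=
  (List.range items.length).filter (fun n => decide (items.getD n "" ∈ tx))

def pvCntN (txs : List (List String)) (items : List String) (trip : List Nat) : Nat :=
  txs.countP (fun tx => trip.all (fun n => decide (items.getD n "" ∈ tx)))

lemma pv_items_inner_nodup (pair : List String) (l : List String) (h : l.Nodup) :
    (pair.foldl (fun items k => if k ∈ items then items else items ++ [k]) l).Nodup := by
  induction pair generalizing l with
  | nil => exact h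
  | cons k ks ih =>
    simp only [List.foldl_cons]
    by_cases hk : k ∈ l
    · rw [if_pos hk]; exact ih l h
    · rw [if_neg hk]
      refine ih _ ?_
      simp only [List.nodup_append, h, true_and, List.nodup_singleton]
      intro a ha
      simp only [List.mem_singleton]
      intro b hbk
      subst hbk
      exact fun he => hk (he ▸ ha)

lemma pv_itemsA_nodup (two_sets : List (List String)) : (pvItemsA two_sets).Nodup := by
  unfold pvItemsA
  have gen : ∀ (ts : List (List String)) (l : List String), l.Nodup →
      (ts.foldl (fun items i => i.foldl (fun items k => if k ∈ items then items else items ++ [k]) items) l).Nodup := by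
    intro ts
    induction ts with
    | nil => exact fun l h => h
    | cons pair rest ih =>
      intro l h
      simp only [List.foldl_cons]
      exact ih _ (pv_items_inner_nodup pair l h)
  exact gen two_sets [] List.nodup_nil

-- ---------- the (pos, items) state of B equals (zipIdx dict of, ) A's items list ----------

lemma pv_build_contains (l : List String) (k : String) :
    (PySem.Dict.mk l.zipIdx : PySem.Dict String Nat).contains k = decide (k ∈ l) := by
  rw [PySem.Dict.contains_eq_decide_mem_keys]
  simp [PySem.Dict.keys_mk, List.zipIdx_map_fst 0 l]

lemma pv_build_insert (l : List String) (k : String) (h : k ∉ l) :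
    (PySem.Dict.mk l.zipIdx : PySem.Dict String Nat).insert k l.length
      = PySem.Dict.mk (l ++ [k]).zipIdx := by
  apply PySem.Dict.ext
  rw [PySem.Dict.items_insert_of_not_contains _ _ (by rw [pv_build_contains]; simp [h])]
  show l.zipIdx ++ [(k, l.length)] = (l ++ [k]).zipIdx
  rw [List.zipIdx_append]
  simp

lemma pv_build_inner (pair : List String) (l : List String) :
    pair.foldl (fun st k => if st.1.contains k then st else (st.1.insert k st.2.length, st.2 ++ [k]))
      ((PySem.Dict.mk l.zipIdx, l) : PySem.Dict String Nat × List String)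
    = (PySem.Dict.mk (pair.foldl (fun items k => if k ∈ items then items else items ++ [k]) l).zipIdx,
       pair.foldl (fun items k => if k ∈ items then items else items ++ [k]) l) := by
  induction pair generalizing l with
  | nil => rfl
  | cons k ks ih =>
    simp only [List.foldl_cons, pv_build_contains]
    by_cases h : k ∈ l
    · simp only [h, decide_true, if_true]
      exact ih l
    · simp only [h, decide_false, Bool.false_eq_true, if_false]
      rw [pv_build_insert l k h]
      exact ih (l ++ [k])

lemma pv_build_eq (two_sets : List (List String)) :
    pvBuildB two_sets = (PySem.Dict.mk (pvItemsA two_sets).zipIdx, pvItemsA two_sets) := by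
  unfold pvBuildB pvItemsA
  have gen : ∀ (ts : List (List String)) (l : List String),
      ts.foldl (fun st pair => pair.foldl
          (fun st k => if st.1.contains k then st else (st.1.insert k st.2.length, st.2 ++ [k])) st)
        ((PySem.Dict.mk l.zipIdx, l) : PySem.Dict String Nat × List String)
      = (PySem.Dict.mk (ts.foldl (fun items i => i.foldl (fun items k => if k ∈ items then items else items ++ [k]) items) l).zipIdx,
         ts.foldl (fun items i => i.foldl (fun items k => if k ∈ items then items else items ++ [k]) items) l) := by
    intro ts
    induction ts with
    | nil => intro l; rfl
    | cons pair rest ih =>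
      intro l
      simp only [List.foldl_cons]
      rw [pv_build_inner]
      exact ih _
  exact gen two_sets []

lemma pv_pos_get? (items : List String) (hnd : items.Nodup) (k : String) (n : Nat) :
    (PySem.Dict.mk items.zipIdx : PySem.Dict String Nat).get? k = some n
      ↔ n < items.length ∧ items.getD n "" = k := by
  rw [PySem.Dict.get?_eq_some_iff_mem_items _ _ _
    (by simpa [PySem.Dict.keys_mk, List.zipIdx_map_fst 0 items] using hnd)]
  show (k, n) ∈ items.zipIdx ↔ _
  rw [List.mk_mem_zipIdx_iff_getElem?]
  constructor
  · intro h
    have hlt : n < items.length := by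
      by_contra hh
      rw [List.getElem?_eq_none (le_of_not_gt hh)] at h
      simp at h
    refine ⟨hlt, ?_⟩
    rw [List.getD_eq_getElem items "" hlt]
    have := List.getElem?_eq_getElem hlt
    rw [this] at h
    exact Option.some.inj h
  · rintro ⟨hlt, rfl⟩
    rw [List.getElem?_eq_getElem hlt, List.getD_eq_getElem items "" hlt]

lemma pv_filterMap_mem (items : List String) (hnd : items.Nodup) (tx : List String) (n : Nat) :
    n ∈ tx.filterMap (fun k => (PySem.Dict.mk items.zipIdx : PySem.Dict String Nat).get? k)
      ↔ n < items.length ∧ items.getD n "" ∈ tx := by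
  rw [List.mem_filterMap]
  constructor
  · rintro ⟨k, hk, hg⟩
    obtain ⟨hlt, he⟩ := (pv_pos_get? items hnd k n).mp hg
    exact ⟨hlt, he ▸ hk⟩
  · rintro ⟨hlt, hmem⟩
    exact ⟨items.getD n "", hmem, (pv_pos_get? items hnd _ n).mpr ⟨hlt, rfl⟩⟩

lemma pv_idxs_sorted (items : List String) (hnd : items.Nodup) (tx : List String) :
    PySem.List.sorted
        (PySem.Set.ofList (tx.filterMap (fun k => (PySem.Dict.mk items.zipIdx : PySem.Dict String Nat).get? k)))
        (fun x => x) false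
      = pvIdxs items tx := by
  apply PySem.List.sorted_eq_of_perm_of_pairwise_lt
  · apply (List.perm_ext_iff_of_nodup (List.Nodup.filter _ List.nodup_range) (PySem.Set.nodup_ofList _)).mpr
    intro n
    rw [PySem.Set.mem_ofList, pv_filterMap_mem items hnd tx n]
    simp [List.mem_filter, List.mem_range]
  · exact List.Pairwise.filter _ List.pairwise_lt_range

-- ---------- combinations: shape, filter, map, order ----------

lemma pv_c2_shape {α : Type} (l : List α) : ∀ p ∈ pvC2 l, p.Sublist l ∧ ∃ a b, p = [a, b] := by
  induction l with
  | nil => intro p hp; simp [pvC2] at hp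
  | cons x xs ih =>
    intro p hp
    simp only [pvC2, List.mem_append, List.mem_map] at hp
    rcases hp with ⟨c, hc, rfl⟩ | hp
    · exact ⟨List.cons_sublist_cons.mpr (List.singleton_sublist.mpr hc), x, c, rfl⟩
    · obtain ⟨hs, ha⟩ := ih p hp
      exact ⟨hs.cons _, ha⟩

lemma pv_c3_shape {α : Type} (l : List α) : ∀ t ∈ pvC3 l, t.Sublist l ∧ ∃ a b c, t = [a, b, c] := by
  induction l with
  | nil => intro t ht; simp [pvC3] at ht
  | cons x xs ih =>
    intro t ht
    simp only [pvC3, List.mem_append, List.mem_map] at ht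
    rcases ht with ⟨p, hp, rfl⟩ | ht
    · obtain ⟨hs, a, b, rfl⟩ := pv_c2_shape xs p hp
      exact ⟨List.cons_sublist_cons.mpr hs, x, a, b, rfl⟩
    · obtain ⟨hs, ha⟩ := ih t ht
      exact ⟨hs.cons _, ha⟩

lemma pv_c2_filter {α : Type} [DecidableEq α] (p : α → Bool) (l : List α) :
    pvC2 (l.filter p) = (pvC2 l).filter (fun t => t.all p) := by
  induction l with
  | nil => rfl
  | cons x xs ih =>
    by_cases hx : p x
    · simp only [List.filter_cons, hx, if_true, pvC2, List.filter_append, ih]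
      congr 1
      rw [List.filter_map]
      congr 1
      apply List.filter_congr
      intro c _
      simp [Function.comp, hx]
    · simp only [List.filter_cons, hx, Bool.false_eq_true, if_false, pvC2, List.filter_append, ih]
      have : (xs.map (fun c => [x, c])).filter (fun t => t.all p) = [] := by
        apply List.filter_eq_nil_iff.mpr
        intro t ht
        rcases List.mem_map.mp ht with ⟨c, _, rfl⟩
        simp [hx]
      rw [this, List.nil_append]

lemma pv_c3_filter {α : Type} [DecidableEq α] (p : α → Bool) (l : List α) :
    pvC3 (l.filter p) = (pvC3 l).filter (fun t => t.all p) := by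
  induction l with
  | nil => rfl
  | cons x xs ih =>
    by_cases hx : p x
    · simp only [List.filter_cons, hx, if_true, pvC3, List.filter_append, ih]
      congr 1
      rw [pv_c2_filter, List.filter_map]
      congr 1
      apply List.filter_congr
      intro c _
      simp [Function.comp, hx]
    · simp only [List.filter_cons, hx, Bool.false_eq_true, if_false, pvC3, List.filter_append, ih]
      have : ((pvC2 xs).map (fun t => x :: t)).filter (fun t => t.all p) = [] := by
        apply List.filter_eq_nil_iff.mpr
        intro t ht
        rcases List.mem_map.mp ht with ⟨c, _, rfl⟩
        simp [hx]
      rw [this, List.nil_append]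

lemma pv_c2_map {α β : Type} (f : α → β) (l : List α) :
    pvC2 (l.map f) = (pvC2 l).map (List.map f) := by
  induction l with
  | nil => rfl
  | cons x xs ih =>
    simp [pvC2, List.map_map, ih, Function.comp]

lemma pv_c3_map {α β : Type} (f : α → β) (l : List α) :
    pvC3 (l.map f) = (pvC3 l).map (List.map f) := by
  induction l with
  | nil => rfl
  | cons x xs ih =>
    simp [pvC3, List.map_map, ih, pv_c2_map, Function.comp]

lemma pv_c2_pairwise (l : List Nat) (h : l.Pairwise (· < ·)) :
    (pvC2 l).Pairwise (fun a b => a < b) := by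
  induction l with
  | nil => simp [pvC2]
  | cons x xs ih =>
    rcases List.pairwise_cons.mp h with ⟨hx, hxs⟩
    simp only [pvC2]
    rw [List.pairwise_append]
    refine ⟨?_, ih hxs, ?_⟩
    · rw [List.pairwise_map]
      exact hxs.imp (fun hab => List.Lex.cons (List.Lex.rel hab))
    · intro a ha b hb
      rcases List.mem_map.mp ha with ⟨c, _, rfl⟩
      obtain ⟨hs, b1, b2, rfl⟩ := pv_c2_shape xs b hb
      exact List.Lex.rel (hx b1 (hs.subset (by simp)))

lemma pv_c3_pairwise (l : List Nat) (h : l.Pairwise (· < ·)) :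
    (pvC3 l).Pairwise (fun a b => a < b) := by
  induction l with
  | nil => simp [pvC3]
  | cons x xs ih =>
    rcases List.pairwise_cons.mp h with ⟨hx, hxs⟩
    simp only [pvC3]
    rw [List.pairwise_append]
    refine ⟨?_, ih hxs, ?_⟩
    · rw [List.pairwise_map]
      exact (pv_c2_pairwise xs hxs).imp (fun hab => List.Lex.cons hab)
    · intro a ha b hb
      rcases List.mem_map.mp ha with ⟨p, _, rfl⟩
      obtain ⟨hs, b1, b2, b3, rfl⟩ := pv_c3_shape xs b hb
      exact List.Lex.rel (hx b1 (hs.subset (by simp)))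

-- ---------- A's combinations_with_replacement + distinctness filter = combinations ----------

lemma pv_distinct3_iff (a b c : String) :
    ((PySem.Set.ofList [a, b, c]).length == 3) = (!(a == b) && !(a == c) && !(b == c)) := by
  simp only [PySem.Set.ofList, List.foldl, PySem.Set.add, PySem.Set.empty]
  by_cases h1 : a = b <;> by_cases h2 : a = c <;> by_cases h3 : b = c <;>
    simp_all [PySem.Set.contains] <;> split_ifs <;> simp_all <;> (try simp_all [eq_comm])

lemma pv_cw2_shape (l : List String) : ∀ p ∈ pvCW2 l, ∃ a b, p = [a, b] ∧ a ∈ l ∧ b ∈ l := by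
  induction l with
  | nil => intro p hp; simp [pvCW2] at hp
  | cons x xs ih =>
    intro p hp
    simp only [pvCW2, List.mem_append, List.mem_map] at hp
    rcases hp with ⟨c, hc, rfl⟩ | hp
    · exact ⟨x, c, rfl, by simp, hc⟩
    · obtain ⟨a, b, rfl, ha, hb⟩ := ih p hp
      exact ⟨a, b, rfl, List.mem_cons_of_mem _ ha, List.mem_cons_of_mem _ hb⟩

lemma pv_cw2_filter (l : List String) (h : l.Nodup) :
    (pvCW2 l).filter (fun p => !(PySem.List.pyGetD p 0 "" == PySem.List.pyGetD p 1 "")) = pvC2 l := by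
  induction l with
  | nil => rfl
  | cons x xs ih =>
    rcases List.nodup_cons.mp h with ⟨hx, hxs⟩
    simp only [pvCW2, pvC2, List.filter_append]
    rw [← ih hxs]
    congr 1
    rw [List.filter_map]
    have hfx : List.filter ((fun p => !(PySem.List.pyGetD p 0 "" == PySem.List.pyGetD p 1 "")) ∘ (fun c => [x, c])) (x :: xs) = xs := by
      simp only [Function.comp_def]
      rw [List.filter_cons_of_neg (by simp [PySem.List.pyGetD])]
      apply List.filter_eq_self.mpr
      intro c hc
      have hne : x ≠ c := fun hxc => hx (hxc ▸ hc)
      simp [PySem.List.pyGetD, hne]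
    rw [hfx]

lemma pv_cw3_filter (l : List String) (h : l.Nodup) :
    (pvCW3 l).filter (fun t => (PySem.Set.ofList t).length == 3) = pvC3 l := by
  induction l with
  | nil => rfl
  | cons x xs ih =>
    rcases List.nodup_cons.mp h with ⟨hx, hxs⟩
    simp only [pvCW3, pvC3, List.filter_append]
    congr 1
    · rw [List.filter_map]
      congr 1
      rw [show pvCW2 (x :: xs) = (x :: xs).map (fun c => [x, c]) ++ pvCW2 xs from rfl,
        List.filter_append]
      have h1 : ((x :: xs).map (fun c => [x, c])).filter ((fun t => (PySem.Set.ofList t).length == 3) ∘ fun p => x :: p) = [] := by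
        apply List.filter_eq_nil_iff.mpr
        intro p hp
        rcases List.mem_map.mp hp with ⟨c, _, rfl⟩
        show ¬ (((PySem.Set.ofList [x, x, c]).length == 3) = true)
        rw [pv_distinct3_iff]
        simp
      have h2 : (pvCW2 xs).filter ((fun t => (PySem.Set.ofList t).length == 3) ∘ fun p => x :: p)
          = (pvCW2 xs).filter (fun p => !(PySem.List.pyGetD p 0 "" == PySem.List.pyGetD p 1 "")) := by
        apply List.filter_congr
        intro p hp
        obtain ⟨a, b, rfl, ha, hb⟩ := pv_cw2_shape xs p hp
        have hne1 : x ≠ a := fun he => hx (he ▸ ha)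
        have hne2 : x ≠ b := fun he => hx (he ▸ hb)
        show ((PySem.Set.ofList [x, a, b]).length == 3) = _
        rw [pv_distinct3_iff]
        simp [PySem.List.pyGetD, hne1, hne2]
      rw [h1, h2, pv_cw2_filter xs hxs, List.nil_append]
    · exact ih hxs

-- ---------- loop shapes ----------

lemma pv_foldl_tx (txs : List (List String)) (P : List String → Prop) [DecidablePred P]
    (v : List String) (acc : List (List String)) :
    txs.foldl (fun acc tx => if P tx then acc ++ [v] else acc) acc
      = acc ++ List.replicate (txs.countP (fun tx => decide (P tx))) v := by
  induction txs generalizing acc with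
  | nil => simp
  | cons tx rest ih =>
    simp only [List.foldl_cons, List.countP_cons]
    by_cases h : P tx
    · rw [if_pos h, ih]
      simp only [h, decide_true, if_true]
      rw [List.append_assoc, List.singleton_append, ← List.replicate_succ]
    · rw [if_neg h, ih]
      simp [h]

lemma pv_foldl_filter_append {α β : Type} (l : List α) (p : α → Bool) (h : α → List β)
    (acc : List β) (hp : ∀ t ∈ l, p t = false → h t = []) :
    (l.filter p).foldl (fun acc t => acc ++ h t) acc = l.foldl (fun acc t => acc ++ h t) acc := by
  induction l generalizing acc with
  | nil => rfl
  | cons t rest ih =>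
    simp only [List.filter_cons, List.foldl_cons]
    by_cases hpt : p t
    · rw [if_pos hpt]
      simp only [List.foldl_cons]
      exact ih _ (fun a ha => hp a (List.mem_cons_of_mem _ ha))
    · rw [if_neg hpt, hp t (List.mem_cons_self ..) (Bool.not_eq_true _ ▸ hpt), List.append_nil]
      exact ih _ (fun a ha => hp a (List.mem_cons_of_mem _ ha))

-- ---------- the counts dict ----------

lemma pv_counts_getD (items : List String) (txs : List (List String))
    (d : PySem.Dict (List Nat) Int) (trip : List Nat) :
    (txs.foldl (fun d tx => (pvC3 (pvIdxs items tx)).foldl (fun d t => d.insert t (d.getD t 0 + 1)) d) d).getD trip 0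
      = d.getD trip 0 + ((txs.map (fun tx => ((pvC3 (pvIdxs items tx)).count trip : Int))).sum) := by
  induction txs generalizing d with
  | nil => simp
  | cons tx rest ih =>
    simp only [List.foldl_cons, List.map_cons, List.sum_cons]
    rw [ih, PySem.Dict.getD_foldl_insert_add_one]
    ring

lemma pv_counts_keys (items : List String) (txs : List (List String)) (d : PySem.Dict (List Nat) Int) :
    (txs.foldl (fun d tx => (pvC3 (pvIdxs items tx)).foldl (fun d t => d.insert t (d.getD t 0 + 1)) d) d).keys
      = PySem.Set.update d.keys (txs.flatMap (fun tx => pvC3 (pvIdxs items tx))) := by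
  induction txs generalizing d with
  | nil => simp [PySem.Set.update]
  | cons tx rest ih =>
    simp only [List.foldl_cons, List.flatMap_cons]
    rw [ih, PySem.Dict.keys_foldl_insert]
    simp [PySem.Set.update, List.foldl_append]

lemma pv_count_indicator (items : List String) (tx : List String) (trip : List Nat)
    (hRnd : (pvC3 (List.range items.length)).Nodup) :
    (pvC3 (pvIdxs items tx)).count trip
      = if trip ∈ pvC3 (List.range items.length) ∧ trip.all (fun n => decide (items.getD n "" ∈ tx)) = true
        then 1 else 0 := by
  unfold pvIdxs
  rw [pv_c3_filter]
  by_cases hm : trip ∈ (pvC3 (List.range items.length)).filter (fun t => t.all (fun n => decide (items.getD n "" ∈ tx)))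
  · rw [List.count_eq_one_of_mem (hRnd.filter _) hm]
    rcases List.mem_filter.mp hm with ⟨h1, h2⟩
    rw [if_pos ⟨h1, h2⟩]
  · rw [List.count_eq_zero_of_not_mem hm]
    rw [if_neg (fun hc => hm (List.mem_filter.mpr ⟨hc.1, hc.2⟩))]

lemma pv_counts_value (items : List String) (txs : List (List String)) (trip : List Nat)
    (hRnd : (pvC3 (List.range items.length)).Nodup)
    (htrip : trip ∈ pvC3 (List.range items.length)) :
    (txs.foldl (fun d tx => (pvC3 (pvIdxs items tx)).foldl (fun d t => d.insert t (d.getD t 0 + 1)) d)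
        (PySem.Dict.empty : PySem.Dict (List Nat) Int)).getD trip 0
      = (pvCntN txs items trip : Int) := by
  rw [pv_counts_getD, PySem.Dict.getD_empty, zero_add]
  unfold pvCntN
  induction txs with
  | nil => simp
  | cons tx rest ih =>
    simp only [List.map_cons, List.sum_cons, List.countP_cons, ih]
    rw [pv_count_indicator items tx trip hRnd]
    by_cases h : trip.all (fun n => decide (items.getD n "" ∈ tx)) = true
    · rw [if_pos ⟨htrip, h⟩, if_pos h]
      push_cast
      ring
    · rw [if_neg (fun hc => h hc.2), if_neg h]
      push_cast
      ring

lemma pv_sorted_keys (items : List String) (txs : List (List String))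
    (hRnd : (pvC3 (List.range items.length)).Nodup)
    (hRpw : (pvC3 (List.range items.length)).Pairwise (fun a b => a < b)) :
    PySem.List.sorted
        (txs.foldl (fun d tx => (pvC3 (pvIdxs items tx)).foldl (fun d t => d.insert t (d.getD t 0 + 1)) d)
          (PySem.Dict.empty : PySem.Dict (List Nat) Int)).keys (fun x => x) false
      = (pvC3 (List.range items.length)).filter (fun trip => decide (pvCntN txs items trip ≠ 0)) := by
  have key := PySem.List.sorted_eq_of_perm_of_pairwise_lt
    (txs.foldl (fun d tx => (pvC3 (pvIdxs items tx)).foldl (fun d t => d.insert t (d.getD t 0 + 1)) d)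
      (PySem.Dict.empty : PySem.Dict (List Nat) Int)).keys
    ((pvC3 (List.range items.length)).filter (fun trip => decide (pvCntN txs items trip ≠ 0)))
    (fun a => a) ?_ ?_
  · convert key using 2
  · rw [pv_counts_keys, PySem.Dict.keys_empty]
    have hkeys : PySem.Set.update ([] : PySem.Set (List Nat)) (txs.flatMap (fun tx => pvC3 (pvIdxs items tx)))
        = PySem.Set.ofList (txs.flatMap (fun tx => pvC3 (pvIdxs items tx))) := rfl
    rw [hkeys]
    refine (List.perm_ext_iff_of_nodup (hRnd.filter _) (PySem.Set.nodup_ofList _)).mpr ?_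
    intro trip
    rw [List.mem_filter, PySem.Set.mem_ofList, List.mem_flatMap]
    constructor
    · rintro ⟨h1, h2⟩
      have hpos : 0 < pvCntN txs items trip := Nat.pos_of_ne_zero (by simpa using h2)
      obtain ⟨tx, htx, hp⟩ := List.countP_pos_iff.mp hpos
      refine ⟨tx, htx, ?_⟩
      unfold pvIdxs
      rw [pv_c3_filter]
      exact List.mem_filter.mpr ⟨h1, hp⟩
    · rintro ⟨tx, htx, hmem⟩
      unfold pvIdxs at hmem
      rw [pv_c3_filter] at hmem
      rcases List.mem_filter.mp hmem with ⟨h1, h2⟩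
      refine ⟨h1, ?_⟩
      simp only [decide_eq_true_eq]
      exact Nat.pos_iff_ne_zero.mp (List.countP_pos_iff.mpr ⟨tx, htx, h2⟩)
  · exact hRpw.filter _

-- indexing a literal triple
lemma pv_pyGetD3_0 {α : Type} (a b c : α) (d : α) : PySem.List.pyGetD [a, b, c] 0 d = a := rfl
lemma pv_pyGetD3_1 {α : Type} (a b c : α) (d : α) : PySem.List.pyGetD [a, b, c] 1 d = b := rfl
lemma pv_pyGetD3_2 {α : Type} (a b c : α) (d : α) : PySem.List.pyGetD [a, b, c] 2 d = c := rfl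

-- ===== VERDICT (by name: the statement is the Claim_ definition above) =====
theorem three_item_sets_spec : Claim_equal_three_item_sets := by
  intro ts txs _
  show three_item_sets ts txs = three_item_sets_alt ts txs
  obtain ⟨items, hitems, hnd⟩ : ∃ items, pvItemsA ts = items ∧ items.Nodup :=
    ⟨pvItemsA ts, rfl, pv_itemsA_nodup ts⟩
  have hRpw : (pvC3 (List.range items.length)).Pairwise (fun a b => a < b) :=
    pv_c3_pairwise _ List.pairwise_lt_range
  have hRnd : (pvC3 (List.range items.length)).Nodup := hRpw.imp (fun hab => ne_of_lt hab)
  have hmapitems : items = (List.range items.length).map (fun n => items.getD n "") := by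
    apply List.ext_getElem (by simp)
    intro n h1 h2
    rw [List.getElem_map, List.getElem_range, List.getD_eq_getElem items "" h1]
  -- ---- A reduced to a fold over index triples ----
  have hA : three_item_sets ts txs
      = (pvC3 (List.range items.length)).foldl
          (fun acc trip => acc ++ List.replicate (pvCntN txs items trip)
            (trip.map (fun n => items.getD n ""))) [] := by
    unfold three_item_sets
    rw [hitems, PySem.List.foldl_if_eq_foldl_filter, pv_cw3_filter items hnd]
    rw [PySem.List.foldl_congr_mem _ _
      (fun acc t => acc ++ List.replicate (txs.countP (fun tx =>
        decide (PySem.List.pyGetD t 0 "" ∈ tx ∧ PySem.List.pyGetD t 1 "" ∈ tx ∧ PySem.List.pyGetD t 2 "" ∈ tx))) t) _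
      (fun acc t _ => pv_foldl_tx txs _ t acc)]
    conv_lhs => rw [show pvC3 items
        = (pvC3 (List.range items.length)).map (List.map (fun n => items.getD n "")) from by
      conv_lhs => rw [hmapitems]
      exact pv_c3_map _ _]
    rw [List.foldl_map]
    apply PySem.List.foldl_congr_mem
    intro acc trip htrip
    obtain ⟨hs, i, j, k, rfl⟩ := pv_c3_shape _ trip htrip
    have hcnt : txs.countP (fun tx =>
        decide (PySem.List.pyGetD ([i, j, k].map (fun n => items.getD n "")) 0 "" ∈ tx ∧
          PySem.List.pyGetD ([i, j, k].map (fun n => items.getD n "")) 1 "" ∈ tx ∧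
          PySem.List.pyGetD ([i, j, k].map (fun n => items.getD n "")) 2 "" ∈ tx))
        = pvCntN txs items [i, j, k] := by
      unfold pvCntN
      apply List.countP_congr
      intro tx _
      simp [pv_pyGetD3_1, pv_pyGetD3_2, List.all_cons]
    rw [hcnt]
  -- ---- B reduced to the same fold ----
  have hB : three_item_sets_alt ts txs
      = (pvC3 (List.range items.length)).foldl
          (fun acc trip => acc ++ List.replicate (pvCntN txs items trip)
            (trip.map (fun n => items.getD n ""))) [] := by
    unfold three_item_sets_alt
    rw [pv_build_eq, hitems]
    have hcounts : pvCountsB (PySem.Dict.mk items.zipIdx) txs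
        = txs.foldl (fun d tx => (pvC3 (pvIdxs items tx)).foldl
            (fun d t => d.insert t (d.getD t 0 + 1)) d)
          (PySem.Dict.empty : PySem.Dict (List Nat) Int) := by
      unfold pvCountsB
      have hf : (fun (d : PySem.Dict (List Nat) Int) tx =>
          (pvC3 (PySem.List.sorted (PySem.Set.ofList (tx.filterMap
            (fun k => (PySem.Dict.mk items.zipIdx : PySem.Dict String Nat).get? k))) (fun x => x) false)).foldl
            (fun d trip => d.insert trip (d.getD trip 0 + 1)) d)
          = (fun d tx => (pvC3 (pvIdxs items tx)).foldl (fun d t => d.insert t (d.getD t 0 + 1)) d) := by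
        funext d tx
        rw [pv_idxs_sorted items hnd tx]
      rw [hf]
    unfold pvEmitB
    rw [hcounts, pv_sorted_keys items txs hRnd hRpw]
    rw [PySem.List.foldl_congr_mem _ _
      (fun acc trip => acc ++ List.replicate (pvCntN txs items trip)
        (trip.map (fun n => items.getD n ""))) _ ?_]
    · exact pv_foldl_filter_append _ _ _ _ (fun t _ hf => by
        have : pvCntN txs items t = 0 := by simpa using hf
        simp [this])
    · intro acc trip htrip
      rcases List.mem_filter.mp htrip with ⟨hmem, _⟩
      rw [pv_counts_value items txs trip hRnd hmem]
      obtain ⟨hs, i, j, k, rfl⟩ := pv_c3_shape _ trip hmem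
      have hik : i < items.length := by
        have := hs.subset (by simp : i ∈ [i, j, k])
        simpa [List.mem_range] using this
      have hjk : j < items.length := by
        have := hs.subset (by simp : j ∈ [i, j, k])
        simpa [List.mem_range] using this
      have hkk : k < items.length := by
        have := hs.subset (by simp : k ∈ [i, j, k])
        simpa [List.mem_range] using this
      simp only [pv_pyGetD3_0, pv_pyGetD3_1, pv_pyGetD3_2, Int.toNat_natCast,
        PySem.List.pyGetD_natCast, List.map_cons, List.map_nil]
  rw [hA, hB]
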